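-- pv_equiv track=rewrite | github.com/lovit/soynlp | soynlp/noun/lr.py | remove_ambiguous_features
-- ===== SOURCE A (Python) =====
-- def remove_ambiguous_features(word, word_features, pos_features, neg_features, common_features):
--     def exist_longer_feature(word, r):
--         for e in range(len(word) - 1, -1, -1):
--             longer = word[e:] + r
--             if (longer in pos_features) or (longer in neg_features) or (longer in common_features):
--                 return True
--         return False
--
--     def satisfy(word, r):
--         if exist_longer_feature(word, r):
--             # negative -다고, -자는
--             # ('관계자' 의 경우 '관계 + 자는'으로 고려될 수 있음)
--             return False
--         return True
--
--     refined = [r_freq for r_freq in word_features if satisfy(word, r_freq[0])]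
--     ambiguous = {r_freq[0] for r_freq in word_features if not satisfy(word, r_freq[0])}
--     return refined, ambiguous
-- ===== SOURCE B (Python) =====
-- def remove_ambiguous_features(word, word_features, pos_features, neg_features, common_features):
--     # Inverted search: instead of testing every candidate r against all suffix+r
--     # strings, enumerate the feature strings once; whenever a feature starts with a
--     # nonempty suffix of word, its stripped remainder is an ambiguous key.
--     n = len(word)
--     bad = set()
--     for f in [*pos_features, *neg_features, *common_features]:
--         for k in range(1, min(len(f), n) + 1):
--             if f[:k] == word[n - k:]:
--                 bad.add(f[k:])
--     refined = [rf for rf in word_features if rf[0] not in bad]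
--     ambiguous = {rf[0] for rf in word_features if rf[0] in bad}
--     return refined, ambiguous
-- ===== Notes on version B (the rewrite author's own statement) =====
-- stated objective: faster
-- what changed: A scans, for every candidate feature r, all suffix+r strings against the three feature lists (twice, via two comprehensions); B inverts the search: it enumerates the feature strings once, strips each prefix that is a nonempty suffix of word, precomputes the set of all ambiguous remainders, and then partitions word_features with a single set lookup per candidate.
import Mathlib
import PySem

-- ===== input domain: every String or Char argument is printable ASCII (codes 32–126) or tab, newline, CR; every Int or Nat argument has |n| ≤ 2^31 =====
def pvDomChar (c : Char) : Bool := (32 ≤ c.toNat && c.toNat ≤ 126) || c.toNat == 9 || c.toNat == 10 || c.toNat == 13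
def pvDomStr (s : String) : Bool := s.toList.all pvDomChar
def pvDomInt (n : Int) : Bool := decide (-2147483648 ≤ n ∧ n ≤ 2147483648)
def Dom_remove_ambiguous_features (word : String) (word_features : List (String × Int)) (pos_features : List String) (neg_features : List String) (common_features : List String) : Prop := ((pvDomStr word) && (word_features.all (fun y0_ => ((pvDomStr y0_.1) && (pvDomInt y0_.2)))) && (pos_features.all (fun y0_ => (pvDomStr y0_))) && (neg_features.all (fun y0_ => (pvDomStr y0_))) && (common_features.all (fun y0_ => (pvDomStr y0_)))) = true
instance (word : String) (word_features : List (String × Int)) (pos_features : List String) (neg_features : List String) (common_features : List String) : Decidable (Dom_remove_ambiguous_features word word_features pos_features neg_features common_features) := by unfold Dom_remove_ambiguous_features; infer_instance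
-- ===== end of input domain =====

-- B inverts the search: instead of testing, for every candidate r, each suffix+r against
-- the feature lists, it enumerates the feature strings once, strips each matching
-- word-suffix prefix, and precomputes the set of all ambiguous remainders.

-- ===== PORT A =====
-- A's inner 'exist_longer_feature': for e in range(len(word)-1, -1, -1), early return True on hit
def pvExistLongerA (word r : String) (pos_features neg_features common_features : List String) : Bool :=
  (PySem.List.pyRange ((word.toList.length : Int) - 1) (-1) (-1)).any (fun e =>
    let longer := String.ofList (PySem.List.slice word.toList (some e) none ++ r.toList)
    pos_features.contains longer || neg_features.contains longer || common_features.contains longer)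

-- A's 'satisfy'
def pvSatisfyA (word r : String) (pos_features neg_features common_features : List String) : Bool :=
  if pvExistLongerA word r pos_features neg_features common_features then false else true

def remove_ambiguous_features (word : String) (word_features : List (String × Int)) (pos_features : List String) (neg_features : List String) (common_features : List String) : (List (String × Int)) × List String :=
  let refined := word_features.filter (fun rf => pvSatisfyA word rf.1 pos_features neg_features common_features)
  let ambiguous : PySem.Set String := PySem.Set.ofList
    ((word_features.filter (fun rf => !(pvSatisfyA word rf.1 pos_features neg_features common_features))).map (·.1))
  (refined, ambiguous)

-- ===== PORT B =====
-- B's 'bad' set: for f in feats: for k in range(1, min(len(f), n)+1): if f[:k]==word[n-k:]: bad.add(f[k:])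
def pvBadSet (word : List Char) (feats : List String) : PySem.Set String :=
  feats.foldl (fun bad f =>
    (PySem.List.pyRange 1 (((min f.toList.length word.length : Nat) : Int) + 1) 1).foldl
      (fun bad k =>
        if PySem.List.slice f.toList none (some k)
            = PySem.List.slice word (some ((word.length : Int) - k)) none
        then PySem.Set.add bad (String.ofList (PySem.List.slice f.toList (some k) none))
        else bad) bad) PySem.Set.empty

def remove_ambiguous_features_alt (word : String) (word_features : List (String × Int)) (pos_features : List String) (neg_features : List String) (common_features : List String) : (List (String × Int)) × List String :=
  let bad := pvBadSet word.toList (pos_features ++ neg_features ++ common_features)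
  let refined := word_features.filter (fun rf => !(PySem.Set.contains bad rf.1))
  let ambiguous : PySem.Set String := PySem.Set.ofList
    ((word_features.filter (fun rf => PySem.Set.contains bad rf.1)).map (·.1))
  (refined, ambiguous)

-- ===== PRECONDITION & SPEC =====
def Spec_remove_ambiguous_features (word : String) (word_features : List (String × Int)) (pos_features : List String) (neg_features : List String) (common_features : List String) (out : (List (String × Int)) × List String) : Prop := out = remove_ambiguous_features_alt word word_features pos_features neg_features common_features
instance (word : String) (word_features : List (String × Int)) (pos_features : List String) (neg_features : List String) (common_features : List String) (out : (List (String × Int)) × List String) : Decidable (Spec_remove_ambiguous_features word word_features pos_features neg_features common_features out) := by unfold Spec_remove_ambiguous_features; infer_instance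

-- ===== CLAIM =====
def Claim_equal_remove_ambiguous_features : Prop := ∀ (word : String) (word_features : List (String × Int)) (pos_features : List String) (neg_features : List String) (common_features : List String), Dom_remove_ambiguous_features word word_features pos_features neg_features common_features → Spec_remove_ambiguous_features word word_features pos_features neg_features common_features (remove_ambiguous_features word word_features pos_features neg_features common_features)

-- ===== LEMMAS AND PROOFS =====

-- membership in the inner loop's result (one feature string f processed)
theorem pv_mem_inner (w : List Char) (f : String) (bad : PySem.Set String) (x : String) :
    (x ∈ (PySem.List.pyRange 1 (((min f.toList.length w.length : Nat) : Int) + 1) 1).foldl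
      (fun bad k =>
        if PySem.List.slice f.toList none (some k)
            = PySem.List.slice w (some ((w.length : Int) - k)) none
        then PySem.Set.add bad (String.ofList (PySem.List.slice f.toList (some k) none))
        else bad) bad)
    ↔ (x ∈ bad ∨ ∃ k : Int, (1 ≤ k ∧ k < ((min f.toList.length w.length : Nat) : Int) + 1) ∧
        PySem.List.slice f.toList none (some k)
          = PySem.List.slice w (some ((w.length : Int) - k)) none ∧
        x = String.ofList (PySem.List.slice f.toList (some k) none)) := by
  rw [PySem.List.foldl_ite_eq_foldl_filter
      (p := fun k => PySem.List.slice f.toList none (some k)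
        = PySem.List.slice w (some ((w.length : Int) - k)) none)
      (f := fun bad k => PySem.Set.add bad (String.ofList (PySem.List.slice f.toList (some k) none)))]
  rw [← List.foldl_map (f := fun k => String.ofList (PySem.List.slice f.toList (some k) none))
      (g := PySem.Set.add)]
  rw [show ∀ (s : PySem.Set String) (xs : List String),
        xs.foldl PySem.Set.add s = PySem.Set.update s xs from fun _ _ => rfl]
  simp only [PySem.Set.mem_update, List.mem_map, List.mem_filter, PySem.List.mem_pyRange_one,
    decide_eq_true_eq]
  constructor
  · rintro (h | ⟨k, ⟨hk, hc⟩, hx⟩)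
    · exact Or.inl h
    · exact Or.inr ⟨k, hk, hc, hx.symm⟩
  · rintro (h | ⟨k, hk, hc, hx⟩)
    · exact Or.inl h
    · exact Or.inr ⟨k, ⟨hk, hc⟩, hx.symm⟩

-- membership in B's precomputed bad set, in Nat form
theorem pv_mem_pvBadSet (w : List Char) (feats : List String) (x : String) :
    x ∈ pvBadSet w feats ↔ ∃ f ∈ feats, ∃ k : Nat,
      1 ≤ k ∧ k ≤ min f.toList.length w.length ∧
      f.toList.take k = w.drop (w.length - k) ∧ x = String.ofList (f.toList.drop k) := by
  unfold pvBadSet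
  have main : ∀ (fs : List String) (s0 : PySem.Set String),
      (x ∈ fs.foldl (fun bad f =>
        (PySem.List.pyRange 1 (((min f.toList.length w.length : Nat) : Int) + 1) 1).foldl
          (fun bad k =>
            if PySem.List.slice f.toList none (some k)
                = PySem.List.slice w (some ((w.length : Int) - k)) none
            then PySem.Set.add bad (String.ofList (PySem.List.slice f.toList (some k) none))
            else bad) bad) s0)
      ↔ (x ∈ s0 ∨ ∃ f ∈ fs, ∃ k : Int,
          (1 ≤ k ∧ k < ((min f.toList.length w.length : Nat) : Int) + 1) ∧
          PySem.List.slice f.toList none (some k)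
            = PySem.List.slice w (some ((w.length : Int) - k)) none ∧
          x = String.ofList (PySem.List.slice f.toList (some k) none)) := by
    intro fs
    induction fs with
    | nil => simp
    | cons g t ih =>
      intro s0
      rw [List.foldl_cons, ih, pv_mem_inner]
      constructor
      · rintro ((h | ⟨k, hk, hc, hx⟩) | ⟨f, hf, hrest⟩)
        · exact Or.inl h
        · exact Or.inr ⟨g, List.mem_cons_self, k, hk, hc, hx⟩
        · exact Or.inr ⟨f, List.mem_cons_of_mem _ hf, hrest⟩
      · rintro (h | ⟨f, hf, hrest⟩)
        · exact Or.inl (Or.inl h)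
        · rcases List.mem_cons.mp hf with rfl | hf'
          · exact Or.inl (Or.inr hrest)
          · exact Or.inr ⟨f, hf', hrest⟩
  rw [main feats PySem.Set.empty]
  have hempty : x ∉ PySem.Set.empty (α := String) := by simp [PySem.Set.empty]
  constructor
  · rintro (h | ⟨f, hf, k, ⟨hk1, hk2⟩, hc, hx⟩)
    · exact absurd h hempty
    · refine ⟨f, hf, k.toNat, ?_, ?_, ?_, ?_⟩
      · omega
      · omega
      · have h1 : PySem.List.slice f.toList none (some k) = f.toList.take k.toNat :=
          PySem.List.slice_to _ (by omega)
        have e2 : ((w.length : Int) - k) = ((w.length - k.toNat : Nat) : Int) := by omega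
        have h2 : PySem.List.slice w (some ((w.length : Int) - k)) none
            = w.drop (w.length - k.toNat) := by
          rw [e2, PySem.List.slice_from_natCast]
        rw [h1, h2] at hc; exact hc
      · have h3 : PySem.List.slice f.toList (some k) none = f.toList.drop k.toNat :=
          PySem.List.slice_from _ (by omega)
        rw [h3] at hx; exact hx
  · rintro ⟨f, hf, k, hk1, hk2, hc, hx⟩
    refine Or.inr ⟨f, hf, (k : Int), ⟨by omega, by omega⟩, ?_, ?_⟩
    · rw [PySem.List.slice_to _ (by omega),
        show ((w.length : Int) - (k : Int)) = ((w.length - k : Nat) : Int) by omega,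
        PySem.List.slice_from_natCast]
      simpa using hc
    · rw [PySem.List.slice_from _ (by omega)]
      simpa using hx

-- the crux: B's precomputed membership equals A's per-candidate suffix scan
theorem pv_contains_eq (word r : String) (pos neg common : List String) :
    PySem.Set.contains (pvBadSet word.toList (pos ++ neg ++ common)) r
      = pvExistLongerA word r pos neg common := by
  rw [Bool.eq_iff_iff]
  unfold pvExistLongerA
  simp only [PySem.Set.contains, List.contains_iff_mem, pv_mem_pvBadSet, List.any_eq_true,
    PySem.List.mem_pyRange_neg_one, Bool.or_eq_true, List.mem_append, or_assoc]
  constructor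
  · rintro ⟨f, hf, k, hk1, hk2, hc, hx⟩
    refine ⟨((word.toList.length - k : Nat) : Int), ⟨by omega, by omega⟩, ?_⟩
    rw [PySem.List.slice_from_natCast]
    have : word.toList.drop (word.toList.length - k) ++ r.toList = f.toList := by
      rw [hx]
      simp only [String.toList_ofList]
      rw [← hc, List.take_append_drop]
    rw [this]
    simp only [String.ofList_toList]
    exact hf
  · rintro ⟨e, ⟨he1, he2⟩, hmem⟩
    have he0 : 0 ≤ e := by omega
    set en := e.toNat with hen
    have heq : PySem.List.slice word.toList (some e) none = word.toList.drop en :=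
      PySem.List.slice_from _ he0
    rw [heq] at hmem
    set f := String.ofList (word.toList.drop en ++ r.toList) with hfdef
    have hflist : f.toList = word.toList.drop en ++ r.toList := by
      simp [hfdef]
    have hlen : (word.toList.drop en).length = word.toList.length - en :=
      List.length_drop
    have hklen : word.toList.length - en ≤ f.toList.length := by
      rw [hflist, List.length_append, hlen]; omega
    refine ⟨f, hmem, word.toList.length - en, by omega, by omega, ?_, ?_⟩
    · rw [hflist, show word.toList.length - (word.toList.length - en) = en by omega]
      rw [List.take_append_of_le_length (by omega)]
      rw [List.take_of_length_le (by omega)]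
    · rw [hflist, List.drop_append_of_le_length (by omega),
        List.drop_of_length_le (by omega)]
      simp

-- A's satisfy is the negation of the suffix-scan
theorem pv_satisfy_eq (word r : String) (pos neg common : List String) :
    pvSatisfyA word r pos neg common = !(pvExistLongerA word r pos neg common) := by
  unfold pvSatisfyA
  cases pvExistLongerA word r pos neg common <;> rfl

-- ===== VERDICT =====
theorem remove_ambiguous_features_spec : Claim_equal_remove_ambiguous_features := by
  intro word wf pos neg common _
  unfold Spec_remove_ambiguous_features remove_ambiguous_features remove_ambiguous_features_alt
  simp only [pv_satisfy_eq, pv_contains_eq, Bool.not_not]
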